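-- pv_equiv track=rewrite | github.com/thirupathireddy665/crossbeam | src/bustle_generated_properties.py | is_zero
-- ===== SOURCE A (Python) =====
-- AllTrue = -1
--
-- Mixed = 0
--
-- AllFalse = 1
--
-- def is_zero(inputs):
--     is_true_present = False
--     is_false_present = False
--     for program_input in inputs:
--         if program_input == 0:
--             is_true_present = True
--         else:
--             is_false_present = True
--
--     if is_true_present and is_false_present:
--         return Mixed
--     elif is_true_present:
--         return AllTrue
--     else:
--         return AllFalse
-- ===== SOURCE B (Python) =====
-- AllTrue = -1
-- Mixed = 0
-- AllFalse = 1
--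
-- def is_zero(inputs):
--     # Staged early-return passes: no zero at all -> AllFalse;
--     # otherwise, all zeros -> AllTrue; otherwise Mixed.
--     if 0 not in inputs:
--         return AllFalse
--     if all(x == 0 for x in inputs):
--         return AllTrue
--     return Mixed
-- ===== Notes on version B (the rewrite author's own statement) =====
-- stated objective: idiomatic
-- what changed: Replaces the single flag-accumulating loop by an early-return decision chain of two short-circuiting whole-list queries (membership '0 in inputs', then all(x == 0)), with no accumulator state at all.
import Mathlib
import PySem

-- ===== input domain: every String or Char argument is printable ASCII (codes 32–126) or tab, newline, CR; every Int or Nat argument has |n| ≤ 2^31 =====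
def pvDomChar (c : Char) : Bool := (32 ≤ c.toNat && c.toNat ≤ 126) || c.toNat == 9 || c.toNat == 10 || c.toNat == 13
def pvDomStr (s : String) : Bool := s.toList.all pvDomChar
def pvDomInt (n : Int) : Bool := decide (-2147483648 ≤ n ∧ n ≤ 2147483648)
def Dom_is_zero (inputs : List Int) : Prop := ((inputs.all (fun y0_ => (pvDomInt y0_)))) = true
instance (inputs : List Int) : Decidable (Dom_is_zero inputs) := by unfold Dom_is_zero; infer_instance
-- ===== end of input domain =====

-- B replaces A's flag-accumulating loop by an early-return chain of two whole-list queries (membership, then all-zero); same cost, idiomatic.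

-- ===== PORT A =====
def is_zero (inputs : List Int) : Int :=
  let flags := inputs.foldl (fun (st : Bool × Bool) program_input =>
    if program_input == 0 then (true, st.2) else (st.1, true)) (false, false)
  if flags.1 && flags.2 then 0
  else if flags.1 then -1
  else 1

-- ===== PORT B =====
def is_zero_alt (inputs : List Int) : Int :=
  if !(inputs.contains 0) then 1
  else if inputs.all (fun x => x == 0) then -1
  else 0

-- ===== PRECONDITION & SPEC =====
def Spec_is_zero (inputs : List Int) (out : Int) : Prop := out = is_zero_alt inputs
instance (inputs : List Int) (out : Int) : Decidable (Spec_is_zero inputs out) := by unfold Spec_is_zero; infer_instance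

-- ===== CLAIM (what is proved, stated in full; the proofs are below) =====
def Claim_equal_is_zero : Prop := ∀ (inputs : List Int), Dom_is_zero inputs → Spec_is_zero inputs (is_zero inputs)

-- ===== LEMMAS AND PROOFS =====
-- A's two flags after the loop are exactly "some zero occurs" and "some nonzero occurs".
theorem flags_eq (inputs : List Int) :
    inputs.foldl (fun (st : Bool × Bool) program_input =>
      if program_input == 0 then (true, st.2) else (st.1, true)) (false, false)
    = (inputs.contains 0, !inputs.all (fun x => x == 0)) := by
  have h : ∀ (l : List Int) (a b : Bool),
      l.foldl (fun (st : Bool × Bool) program_input =>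
        if program_input == 0 then (true, st.2) else (st.1, true)) (a, b)
      = (a || l.contains 0, b || !l.all (fun x => x == 0)) := by
    intro l
    induction l with
    | nil => simp
    | cons x xs ih =>
      intro a b
      rw [List.foldl_cons]
      by_cases hx : (x == 0) = true
      · rw [if_pos hx, ih]
        simp only [beq_iff_eq] at hx
        simp [hx]
      · rw [if_neg hx, ih]
        have hx' : x ≠ 0 := by simpa using hx
        simp [hx, Ne.symm hx']
  simpa using h inputs false false

-- ===== VERDICT (by name: the statement is the Claim_ definition above) =====
theorem is_zero_spec : Claim_equal_is_zero := by
  intro inputs _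
  unfold Spec_is_zero is_zero is_zero_alt
  rw [flags_eq]
  cases hc : inputs.contains 0 <;> cases ha : inputs.all (fun x => x == 0) <;> simp_all
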